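-- pv_equiv track=rewrite | github.com/abdullah-makhokhar/fragrance-graph | process_data.py | assign_seasons
-- ===== SOURCE A (Python) =====
-- from typing import List, Dict, Set, Tuple
--
-- def assign_seasons(accords: Set[str]) -> List[str]:
--     """Assign multiple seasons based on accords."""
--     accords_lower = set(a.lower() for a in accords)
--     seasons = []
--
--     season_map = {
--         'Winter': {'woody', 'leather', 'oud', 'vanilla', 'amber', 'warm spicy', 'smoky', 'animalic', 'cinnamon'},
--         'Summer': {'citrus', 'fresh', 'aquatic', 'ozonic', 'fruity', 'tropical', 'coconut', 'sea water'},
--         'Spring': {'floral', 'white floral', 'fresh', 'green', 'herbal', 'rose', 'lily-of-the-valley'},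
--         'Autumn': {'amber', 'warm spicy', 'woody', 'earthy', 'powdery', 'tobacco', 'patchouli', 'honey'},
--     }
--
--     for season, season_accords in season_map.items():
--         if len(accords_lower & season_accords) >= 1:
--             seasons.append(season)
--
--     return seasons if seasons else ['Any']
-- ===== SOURCE B (Python) =====
-- from typing import List, Set
--
-- # bit 1 = Winter, 2 = Summer, 4 = Spring, 8 = Autumn
-- _MASK = {'woody': 9, 'leather': 1, 'oud': 1, 'vanilla': 1, 'amber': 9,
--          'warm spicy': 9, 'smoky': 1, 'animalic': 1, 'cinnamon': 1,
--          'citrus': 2, 'fresh': 6, 'aquatic': 2, 'ozonic': 2, 'fruity': 2,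
--          'tropical': 2, 'coconut': 2, 'sea water': 2,
--          'floral': 4, 'white floral': 4, 'green': 4, 'herbal': 4,
--          'rose': 4, 'lily-of-the-valley': 4,
--          'earthy': 8, 'powdery': 8, 'tobacco': 8, 'patchouli': 8, 'honey': 8}
--
-- def assign_seasons(accords: Set[str]) -> List[str]:
--     """Assign multiple seasons based on accords (season bitmask)."""
--     m = 0
--     for a in accords:
--         m |= _MASK.get(a.lower(), 0)
--     out = []
--     if m & 1: out.append('Winter')
--     if m & 2: out.append('Summer')
--     if m & 4: out.append('Spring')
--     if m & 8: out.append('Autumn')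
--     return out if out else ['Any']
-- ===== Notes on version B (the rewrite author's own statement) =====
-- stated objective: alternative
-- what changed: Replaces the per-season set-intersection scan with a single pass that ORs a precomputed per-accord 4-bit season bitmask (_MASK dict) over the input, then decodes the bits in fixed season order.
import Mathlib
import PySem

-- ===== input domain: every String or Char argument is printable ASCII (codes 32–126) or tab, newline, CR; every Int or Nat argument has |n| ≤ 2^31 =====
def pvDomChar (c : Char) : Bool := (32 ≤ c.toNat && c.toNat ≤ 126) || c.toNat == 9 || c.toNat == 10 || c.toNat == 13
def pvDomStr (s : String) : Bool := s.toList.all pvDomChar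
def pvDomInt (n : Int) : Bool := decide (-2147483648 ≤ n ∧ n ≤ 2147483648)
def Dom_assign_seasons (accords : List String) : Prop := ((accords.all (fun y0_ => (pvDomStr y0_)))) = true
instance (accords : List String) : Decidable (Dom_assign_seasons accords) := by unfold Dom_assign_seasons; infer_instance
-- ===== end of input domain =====

-- B replaces A's per-season set intersections by a single pass accumulating a 4-bit season bitmask per accord, then decoding the bits (alternative decomposition, same result).

-- ===== PORT A =====
def seasonMapA : List (String × PySem.Set String) :=
  [("Winter", PySem.Set.ofList ["woody", "leather", "oud", "vanilla", "amber", "warm spicy", "smoky", "animalic", "cinnamon"]),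
   ("Summer", PySem.Set.ofList ["citrus", "fresh", "aquatic", "ozonic", "fruity", "tropical", "coconut", "sea water"]),
   ("Spring", PySem.Set.ofList ["floral", "white floral", "fresh", "green", "herbal", "rose", "lily-of-the-valley"]),
   ("Autumn", PySem.Set.ofList ["amber", "warm spicy", "woody", "earthy", "powdery", "tobacco", "patchouli", "honey"])]

def assign_seasons (accords : List String) : List String :=
  let accordsLower : PySem.Set String := PySem.Set.ofList (accords.map PySem.Str.lower)
  let seasons : List String := seasonMapA.foldl
    (fun acc p => if 1 ≤ PySem.Set.len (PySem.Set.inter accordsLower p.2) then acc ++ [p.1] else acc) []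
  if seasons = [] then ["Any"] else seasons

-- ===== PORT B =====
-- transliteration of the module-level _MASK dict lookup _MASK.get(key, 0): key comparison chain
-- (bit 1 = Winter, 2 = Summer, 4 = Spring, 8 = Autumn)
def accordMask (a : String) : Nat :=
  if a = "woody" then 9
  else if a = "leather" then 1
  else if a = "oud" then 1
  else if a = "vanilla" then 1
  else if a = "amber" then 9
  else if a = "warm spicy" then 9
  else if a = "smoky" then 1
  else if a = "animalic" then 1
  else if a = "cinnamon" then 1
  else if a = "citrus" then 2
  else if a = "fresh" then 6
  else if a = "aquatic" then 2
  else if a = "ozonic" then 2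
  else if a = "fruity" then 2
  else if a = "tropical" then 2
  else if a = "coconut" then 2
  else if a = "sea water" then 2
  else if a = "floral" then 4
  else if a = "white floral" then 4
  else if a = "green" then 4
  else if a = "herbal" then 4
  else if a = "rose" then 4
  else if a = "lily-of-the-valley" then 4
  else if a = "earthy" then 8
  else if a = "powdery" then 8
  else if a = "tobacco" then 8
  else if a = "patchouli" then 8
  else if a = "honey" then 8
  else 0

def assign_seasons_alt (accords : List String) : List String :=
  let m : Nat := accords.foldl (fun m a => m ||| accordMask (PySem.Str.lower a)) 0
  let out0 : List String := []
  let out1 := if m &&& 1 ≠ 0 then out0 ++ ["Winter"] else out0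
  let out2 := if m &&& 2 ≠ 0 then out1 ++ ["Summer"] else out1
  let out3 := if m &&& 4 ≠ 0 then out2 ++ ["Spring"] else out2
  let out4 := if m &&& 8 ≠ 0 then out3 ++ ["Autumn"] else out3
  if out4 = [] then ["Any"] else out4

-- ===== PRECONDITION & SPEC =====
def Spec_assign_seasons (accords : List String) (out : List String) : Prop := out = assign_seasons_alt accords
instance (accords : List String) (out : List String) : Decidable (Spec_assign_seasons accords out) := by unfold Spec_assign_seasons; infer_instance

-- ===== CLAIM (what is proved, stated in full; the proofs are below) =====
def Claim_equal_assign_seasons : Prop := ∀ (accords : List String), Dom_assign_seasons accords → Spec_assign_seasons accords (assign_seasons accords)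

-- ===== LEMMAS AND PROOFS =====
set_option maxRecDepth 4000
set_option maxHeartbeats 1000000

lemma foldl_lor_testBit (f : String → Nat) (i : Nat) (l : List String) (m0 : Nat) :
    (l.foldl (fun m a => m ||| f a) m0).testBit i = true ↔
      m0.testBit i = true ∨ ∃ a ∈ l, (f a).testBit i = true := by
  induction l generalizing m0 with
  | nil => simp
  | cons a l ih =>
    simp only [List.foldl_cons, ih, Nat.testBit_or, Bool.or_eq_true, List.mem_cons]
    constructor
    · rintro (( h | h ) | ⟨b, hb, h⟩)
      · exact Or.inl h
      · exact Or.inr ⟨a, Or.inl rfl, h⟩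
      · exact Or.inr ⟨b, Or.inr hb, h⟩
    · rintro ( h | ⟨b, ( rfl | hb ), h⟩)
      · exact Or.inl (Or.inl h)
      · exact Or.inl (Or.inr h)
      · exact Or.inr ⟨b, hb, h⟩

lemma and_pow_ne_zero (m i : Nat) : m &&& 2 ^ i ≠ 0 ↔ m.testBit i = true := by
  rw [Nat.and_two_pow]
  rcases h : m.testBit i <;> simp [h]

lemma foldl_lor_and_ne (f : String → Nat) (i : Nat) (l : List String) :
    (l.foldl (fun m a => m ||| f a) 0) &&& 2 ^ i ≠ 0 ↔ ∃ a ∈ l, f a &&& 2 ^ i ≠ 0 := by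
  rw [and_pow_ne_zero, foldl_lor_testBit]
  simp only [Nat.zero_testBit, Bool.false_eq_true, false_or]
  exact exists_congr fun a => and_congr_right fun _ => (and_pow_ne_zero (f a) i).symm

lemma maskBit_winter (k : String) :
    (accordMask k) &&& 1 ≠ 0 ↔ k ∈ ["woody", "leather", "oud", "vanilla", "amber", "warm spicy", "smoky", "animalic", "cinnamon"] := by
  simp only [accordMask]
  by_cases h0 : k = "woody"
  · subst h0; decide
  rw [if_neg h0]
  by_cases h1 : k = "leather"
  · subst h1; decide
  rw [if_neg h1]
  by_cases h2 : k = "oud"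
  · subst h2; decide
  rw [if_neg h2]
  by_cases h3 : k = "vanilla"
  · subst h3; decide
  rw [if_neg h3]
  by_cases h4 : k = "amber"
  · subst h4; decide
  rw [if_neg h4]
  by_cases h5 : k = "warm spicy"
  · subst h5; decide
  rw [if_neg h5]
  by_cases h6 : k = "smoky"
  · subst h6; decide
  rw [if_neg h6]
  by_cases h7 : k = "animalic"
  · subst h7; decide
  rw [if_neg h7]
  by_cases h8 : k = "cinnamon"
  · subst h8; decide
  rw [if_neg h8]
  by_cases h9 : k = "citrus"
  · subst h9; decide
  rw [if_neg h9]
  by_cases h10 : k = "fresh"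
  · subst h10; decide
  rw [if_neg h10]
  by_cases h11 : k = "aquatic"
  · subst h11; decide
  rw [if_neg h11]
  by_cases h12 : k = "ozonic"
  · subst h12; decide
  rw [if_neg h12]
  by_cases h13 : k = "fruity"
  · subst h13; decide
  rw [if_neg h13]
  by_cases h14 : k = "tropical"
  · subst h14; decide
  rw [if_neg h14]
  by_cases h15 : k = "coconut"
  · subst h15; decide
  rw [if_neg h15]
  by_cases h16 : k = "sea water"
  · subst h16; decide
  rw [if_neg h16]
  by_cases h17 : k = "floral"
  · subst h17; decide
  rw [if_neg h17]
  by_cases h18 : k = "white floral"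
  · subst h18; decide
  rw [if_neg h18]
  by_cases h19 : k = "green"
  · subst h19; decide
  rw [if_neg h19]
  by_cases h20 : k = "herbal"
  · subst h20; decide
  rw [if_neg h20]
  by_cases h21 : k = "rose"
  · subst h21; decide
  rw [if_neg h21]
  by_cases h22 : k = "lily-of-the-valley"
  · subst h22; decide
  rw [if_neg h22]
  by_cases h23 : k = "earthy"
  · subst h23; decide
  rw [if_neg h23]
  by_cases h24 : k = "powdery"
  · subst h24; decide
  rw [if_neg h24]
  by_cases h25 : k = "tobacco"
  · subst h25; decide
  rw [if_neg h25]
  by_cases h26 : k = "patchouli"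
  · subst h26; decide
  rw [if_neg h26]
  by_cases h27 : k = "honey"
  · subst h27; decide
  rw [if_neg h27]
  simp [h0, h1, h2, h3, h4, h5, h6, h7, h8, h9, h10, h11, h12, h13, h14, h15, h16, h17, h18, h19, h20, h21, h22, h23, h24, h25, h26, h27]

lemma maskBit_summer (k : String) :
    (accordMask k) &&& 2 ≠ 0 ↔ k ∈ ["citrus", "fresh", "aquatic", "ozonic", "fruity", "tropical", "coconut", "sea water"] := by
  simp only [accordMask]
  by_cases h0 : k = "woody"
  · subst h0; decide
  rw [if_neg h0]
  by_cases h1 : k = "leather"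
  · subst h1; decide
  rw [if_neg h1]
  by_cases h2 : k = "oud"
  · subst h2; decide
  rw [if_neg h2]
  by_cases h3 : k = "vanilla"
  · subst h3; decide
  rw [if_neg h3]
  by_cases h4 : k = "amber"
  · subst h4; decide
  rw [if_neg h4]
  by_cases h5 : k = "warm spicy"
  · subst h5; decide
  rw [if_neg h5]
  by_cases h6 : k = "smoky"
  · subst h6; decide
  rw [if_neg h6]
  by_cases h7 : k = "animalic"
  · subst h7; decide
  rw [if_neg h7]
  by_cases h8 : k = "cinnamon"
  · subst h8; decide
  rw [if_neg h8]
  by_cases h9 : k = "citrus"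
  · subst h9; decide
  rw [if_neg h9]
  by_cases h10 : k = "fresh"
  · subst h10; decide
  rw [if_neg h10]
  by_cases h11 : k = "aquatic"
  · subst h11; decide
  rw [if_neg h11]
  by_cases h12 : k = "ozonic"
  · subst h12; decide
  rw [if_neg h12]
  by_cases h13 : k = "fruity"
  · subst h13; decide
  rw [if_neg h13]
  by_cases h14 : k = "tropical"
  · subst h14; decide
  rw [if_neg h14]
  by_cases h15 : k = "coconut"
  · subst h15; decide
  rw [if_neg h15]
  by_cases h16 : k = "sea water"
  · subst h16; decide
  rw [if_neg h16]
  by_cases h17 : k = "floral"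
  · subst h17; decide
  rw [if_neg h17]
  by_cases h18 : k = "white floral"
  · subst h18; decide
  rw [if_neg h18]
  by_cases h19 : k = "green"
  · subst h19; decide
  rw [if_neg h19]
  by_cases h20 : k = "herbal"
  · subst h20; decide
  rw [if_neg h20]
  by_cases h21 : k = "rose"
  · subst h21; decide
  rw [if_neg h21]
  by_cases h22 : k = "lily-of-the-valley"
  · subst h22; decide
  rw [if_neg h22]
  by_cases h23 : k = "earthy"
  · subst h23; decide
  rw [if_neg h23]
  by_cases h24 : k = "powdery"
  · subst h24; decide
  rw [if_neg h24]
  by_cases h25 : k = "tobacco"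
  · subst h25; decide
  rw [if_neg h25]
  by_cases h26 : k = "patchouli"
  · subst h26; decide
  rw [if_neg h26]
  by_cases h27 : k = "honey"
  · subst h27; decide
  rw [if_neg h27]
  simp [h0, h1, h2, h3, h4, h5, h6, h7, h8, h9, h10, h11, h12, h13, h14, h15, h16, h17, h18, h19, h20, h21, h22, h23, h24, h25, h26, h27]

lemma maskBit_spring (k : String) :
    (accordMask k) &&& 4 ≠ 0 ↔ k ∈ ["floral", "white floral", "fresh", "green", "herbal", "rose", "lily-of-the-valley"] := by
  simp only [accordMask]
  by_cases h0 : k = "woody"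
  · subst h0; decide
  rw [if_neg h0]
  by_cases h1 : k = "leather"
  · subst h1; decide
  rw [if_neg h1]
  by_cases h2 : k = "oud"
  · subst h2; decide
  rw [if_neg h2]
  by_cases h3 : k = "vanilla"
  · subst h3; decide
  rw [if_neg h3]
  by_cases h4 : k = "amber"
  · subst h4; decide
  rw [if_neg h4]
  by_cases h5 : k = "warm spicy"
  · subst h5; decide
  rw [if_neg h5]
  by_cases h6 : k = "smoky"
  · subst h6; decide
  rw [if_neg h6]
  by_cases h7 : k = "animalic"
  · subst h7; decide
  rw [if_neg h7]
  by_cases h8 : k = "cinnamon"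
  · subst h8; decide
  rw [if_neg h8]
  by_cases h9 : k = "citrus"
  · subst h9; decide
  rw [if_neg h9]
  by_cases h10 : k = "fresh"
  · subst h10; decide
  rw [if_neg h10]
  by_cases h11 : k = "aquatic"
  · subst h11; decide
  rw [if_neg h11]
  by_cases h12 : k = "ozonic"
  · subst h12; decide
  rw [if_neg h12]
  by_cases h13 : k = "fruity"
  · subst h13; decide
  rw [if_neg h13]
  by_cases h14 : k = "tropical"
  · subst h14; decide
  rw [if_neg h14]
  by_cases h15 : k = "coconut"
  · subst h15; decide
  rw [if_neg h15]
  by_cases h16 : k = "sea water"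
  · subst h16; decide
  rw [if_neg h16]
  by_cases h17 : k = "floral"
  · subst h17; decide
  rw [if_neg h17]
  by_cases h18 : k = "white floral"
  · subst h18; decide
  rw [if_neg h18]
  by_cases h19 : k = "green"
  · subst h19; decide
  rw [if_neg h19]
  by_cases h20 : k = "herbal"
  · subst h20; decide
  rw [if_neg h20]
  by_cases h21 : k = "rose"
  · subst h21; decide
  rw [if_neg h21]
  by_cases h22 : k = "lily-of-the-valley"
  · subst h22; decide
  rw [if_neg h22]
  by_cases h23 : k = "earthy"
  · subst h23; decide
  rw [if_neg h23]
  by_cases h24 : k = "powdery"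
  · subst h24; decide
  rw [if_neg h24]
  by_cases h25 : k = "tobacco"
  · subst h25; decide
  rw [if_neg h25]
  by_cases h26 : k = "patchouli"
  · subst h26; decide
  rw [if_neg h26]
  by_cases h27 : k = "honey"
  · subst h27; decide
  rw [if_neg h27]
  simp [h0, h1, h2, h3, h4, h5, h6, h7, h8, h9, h10, h11, h12, h13, h14, h15, h16, h17, h18, h19, h20, h21, h22, h23, h24, h25, h26, h27]

lemma maskBit_autumn (k : String) :
    (accordMask k) &&& 8 ≠ 0 ↔ k ∈ ["amber", "warm spicy", "woody", "earthy", "powdery", "tobacco", "patchouli", "honey"] := by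
  simp only [accordMask]
  by_cases h0 : k = "woody"
  · subst h0; decide
  rw [if_neg h0]
  by_cases h1 : k = "leather"
  · subst h1; decide
  rw [if_neg h1]
  by_cases h2 : k = "oud"
  · subst h2; decide
  rw [if_neg h2]
  by_cases h3 : k = "vanilla"
  · subst h3; decide
  rw [if_neg h3]
  by_cases h4 : k = "amber"
  · subst h4; decide
  rw [if_neg h4]
  by_cases h5 : k = "warm spicy"
  · subst h5; decide
  rw [if_neg h5]
  by_cases h6 : k = "smoky"
  · subst h6; decide
  rw [if_neg h6]
  by_cases h7 : k = "animalic"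
  · subst h7; decide
  rw [if_neg h7]
  by_cases h8 : k = "cinnamon"
  · subst h8; decide
  rw [if_neg h8]
  by_cases h9 : k = "citrus"
  · subst h9; decide
  rw [if_neg h9]
  by_cases h10 : k = "fresh"
  · subst h10; decide
  rw [if_neg h10]
  by_cases h11 : k = "aquatic"
  · subst h11; decide
  rw [if_neg h11]
  by_cases h12 : k = "ozonic"
  · subst h12; decide
  rw [if_neg h12]
  by_cases h13 : k = "fruity"
  · subst h13; decide
  rw [if_neg h13]
  by_cases h14 : k = "tropical"
  · subst h14; decide
  rw [if_neg h14]
  by_cases h15 : k = "coconut"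
  · subst h15; decide
  rw [if_neg h15]
  by_cases h16 : k = "sea water"
  · subst h16; decide
  rw [if_neg h16]
  by_cases h17 : k = "floral"
  · subst h17; decide
  rw [if_neg h17]
  by_cases h18 : k = "white floral"
  · subst h18; decide
  rw [if_neg h18]
  by_cases h19 : k = "green"
  · subst h19; decide
  rw [if_neg h19]
  by_cases h20 : k = "herbal"
  · subst h20; decide
  rw [if_neg h20]
  by_cases h21 : k = "rose"
  · subst h21; decide
  rw [if_neg h21]
  by_cases h22 : k = "lily-of-the-valley"
  · subst h22; decide
  rw [if_neg h22]
  by_cases h23 : k = "earthy"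
  · subst h23; decide
  rw [if_neg h23]
  by_cases h24 : k = "powdery"
  · subst h24; decide
  rw [if_neg h24]
  by_cases h25 : k = "tobacco"
  · subst h25; decide
  rw [if_neg h25]
  by_cases h26 : k = "patchouli"
  · subst h26; decide
  rw [if_neg h26]
  by_cases h27 : k = "honey"
  · subst h27; decide
  rw [if_neg h27]
  simp [h0, h1, h2, h3, h4, h5, h6, h7, h8, h9, h10, h11, h12, h13, h14, h15, h16, h17, h18, h19, h20, h21, h22, h23, h24, h25, h26, h27]

lemma cond_winter (accords : List String) :
    (accords.foldl (fun m a => m ||| accordMask (PySem.Str.lower a)) 0) &&& 1 ≠ 0 ↔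
      ∃ a ∈ accords, PySem.Str.lower a ∈ ["woody", "leather", "oud", "vanilla", "amber", "warm spicy", "smoky", "animalic", "cinnamon"] := by
  rw [show (1 : Nat) = 2 ^ 0 from rfl, foldl_lor_and_ne]
  exact exists_congr fun a => and_congr_right fun _ => maskBit_winter _

lemma cond_summer (accords : List String) :
    (accords.foldl (fun m a => m ||| accordMask (PySem.Str.lower a)) 0) &&& 2 ≠ 0 ↔
      ∃ a ∈ accords, PySem.Str.lower a ∈ ["citrus", "fresh", "aquatic", "ozonic", "fruity", "tropical", "coconut", "sea water"] := by
  rw [show (2 : Nat) = 2 ^ 1 from rfl, foldl_lor_and_ne]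
  exact exists_congr fun a => and_congr_right fun _ => maskBit_summer _

lemma cond_spring (accords : List String) :
    (accords.foldl (fun m a => m ||| accordMask (PySem.Str.lower a)) 0) &&& 4 ≠ 0 ↔
      ∃ a ∈ accords, PySem.Str.lower a ∈ ["floral", "white floral", "fresh", "green", "herbal", "rose", "lily-of-the-valley"] := by
  rw [show (4 : Nat) = 2 ^ 2 from rfl, foldl_lor_and_ne]
  exact exists_congr fun a => and_congr_right fun _ => maskBit_spring _

lemma cond_autumn (accords : List String) :
    (accords.foldl (fun m a => m ||| accordMask (PySem.Str.lower a)) 0) &&& 8 ≠ 0 ↔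
      ∃ a ∈ accords, PySem.Str.lower a ∈ ["amber", "warm spicy", "woody", "earthy", "powdery", "tobacco", "patchouli", "honey"] := by
  rw [show (8 : Nat) = 2 ^ 3 from rfl, foldl_lor_and_ne]
  exact exists_congr fun a => and_congr_right fun _ => maskBit_autumn _

lemma lenInter_iff (accords L : List String) :
    1 ≤ PySem.Set.len (PySem.Set.inter (PySem.Set.ofList (accords.map PySem.Str.lower)) (PySem.Set.ofList L)) ↔
      ∃ a ∈ accords, PySem.Str.lower a ∈ L := by
  rw [show (1 ≤ PySem.Set.len (PySem.Set.inter (PySem.Set.ofList (accords.map PySem.Str.lower)) (PySem.Set.ofList L))) ↔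
      0 < (PySem.Set.inter (PySem.Set.ofList (accords.map PySem.Str.lower)) (PySem.Set.ofList L)).length from by
        simp [PySem.Set.len, Nat.succ_le_iff]]
  rw [List.length_pos_iff_exists_mem]
  constructor
  · rintro ⟨x, hx⟩
    rw [PySem.Set.mem_inter, PySem.Set.mem_ofList, PySem.Set.mem_ofList] at hx
    obtain ⟨hx1, hx2⟩ := hx
    obtain ⟨a, ha, rfl⟩ := List.mem_map.mp hx1
    exact ⟨a, ha, hx2⟩
  · rintro ⟨a, ha, hL⟩
    exact ⟨PySem.Str.lower a, by
      rw [PySem.Set.mem_inter, PySem.Set.mem_ofList, PySem.Set.mem_ofList]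
      exact ⟨List.mem_map.mpr ⟨a, ha, rfl⟩, hL⟩⟩

lemma ports_agree (accords : List String) : assign_seasons accords = assign_seasons_alt accords := by
  unfold assign_seasons assign_seasons_alt
  simp only [seasonMapA, List.foldl_cons, List.foldl_nil, lenInter_iff,
    cond_winter, cond_summer, cond_spring, cond_autumn]

-- ===== VERDICT (by name: the statement is the Claim_ definition above) =====
theorem assign_seasons_spec : Claim_equal_assign_seasons := by
  intro accords _
  unfold Spec_assign_seasons
  exact ports_agree accords
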